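-- pv_equiv track=rewrite | github.com/sandra-liedtke/cryptoanalysis_modulo | kryptoanalyse.py | elgamal_decrypt
-- ===== SOURCE A (Python) =====
-- def elgamal_decrypt(p, d, a, b):
--     h = a**d % p
--     inverse = 0
--     h1 = 2
--     while h1 != 1:
--         inverse = inverse + 1
--         h1 = h * inverse % p
--     y = b * inverse % p
--     return y
-- ===== SOURCE B (Python) =====
-- def elgamal_decrypt(p, d, a, b):
--     h = pow(a, d, p)
--     # extended Euclid for the modular inverse of h modulo p
--     r0, r1, s0, s1 = h, p, 1, 0
--     while r1 != 0:
--         q = r0 // r1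
--         r0, r1 = r1, r0 - q * r1
--         s0, s1 = s1, s0 - q * s1
--     inverse = s0 % p
--     return b * inverse % p
-- ===== Notes on version B (the rewrite author's own statement) =====
-- stated objective: faster
-- what changed: A finds the modular inverse of h by counting up from 1 and testing h*i % p == 1 (O(p) trial loop); B computes h with three-argument pow and the inverse with the extended Euclidean algorithm (O(log p)).
-- outside the precondition, e.g. on elgamal_decrypt(6, -1, -423, -2): A returns 0, B raises ValueError; on elgamal_decrypt(7, -1, 2, 5): A returns 3, B returns 3
import Mathlib
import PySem

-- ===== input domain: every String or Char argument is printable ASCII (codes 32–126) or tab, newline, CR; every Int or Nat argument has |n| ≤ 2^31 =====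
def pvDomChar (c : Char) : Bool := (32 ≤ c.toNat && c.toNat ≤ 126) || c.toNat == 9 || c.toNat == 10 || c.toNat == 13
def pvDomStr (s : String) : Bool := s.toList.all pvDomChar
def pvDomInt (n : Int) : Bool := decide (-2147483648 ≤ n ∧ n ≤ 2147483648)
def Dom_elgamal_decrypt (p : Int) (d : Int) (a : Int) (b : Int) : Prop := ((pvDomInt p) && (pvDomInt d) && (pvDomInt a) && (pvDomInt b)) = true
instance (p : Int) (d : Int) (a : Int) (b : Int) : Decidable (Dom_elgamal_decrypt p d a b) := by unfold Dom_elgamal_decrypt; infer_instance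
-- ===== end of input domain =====

-- B replaces A's O(p) trial-counting loop for the modular inverse by the extended
-- Euclidean algorithm (and pow(a,d,p) for the power): objective = faster.

-- ===== PORT A =====
-- A's `while h1 != 1` loop; the Nat fuel only makes the recursion total — under
-- Pre_ the loop terminates before the fuel runs out (the Python loop diverges
-- exactly where no inverse exists, which Pre_ excludes).
def elgamalLoopA (p h : Int) : Nat → Int → Int → Int
  | 0, inverse, _ => inverse
  | fuel + 1, inverse, h1 =>
      if h1 ≠ 1 then
        elgamalLoopA p h fuel (inverse + 1) (PySem.Int.mod (h * (inverse + 1)) p)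
      else inverse

def elgamal_decrypt (p : Int) (d : Int) (a : Int) (b : Int) : Int :=
  let h := PySem.Int.mod (a ^ d.toNat) p   -- h = a**d % p  (Pre_ has 0 ≤ d)
  let inverse := elgamalLoopA p h (p.toNat + 1) 0 2
  PySem.Int.mod (b * inverse) p

-- ===== PORT B =====
-- Source B's extended-Euclid loop, step for step (r0 - q*r1 decreases in |·|).
def egcdLoop (r0 r1 s0 s1 : Int) : Int :=
  if hz : r1 = 0 then s0
  else
    let q := PySem.Int.floordiv r0 r1
    egcdLoop r1 (r0 - q * r1) s1 (s0 - q * s1)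
termination_by r1.natAbs
decreasing_by
  have hm := PySem.Int.floordiv_mul_add_mod r0 r1
  have : r0 - PySem.Int.floordiv r0 r1 * r1 = PySem.Int.mod r0 r1 := by omega
  rw [this]
  rcases lt_or_gt_of_ne hz with hneg | hpos
  · have h1 := PySem.Int.mod_neg_bounds r0 hneg
    omega
  · have h1 := PySem.Int.mod_nonneg r0 hpos
    have h2 := PySem.Int.mod_lt r0 hpos
    omega

def elgamal_decrypt_alt (p : Int) (d : Int) (a : Int) (b : Int) : Int :=
  let h := PySem.Int.powMod a d.toNat p    -- pow(a, d, p)  (Pre_ has 0 ≤ d)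
  let inverse := PySem.Int.mod (egcdLoop h p 1 0) p
  PySem.Int.mod (b * inverse) p

-- ===== PRECONDITION & SPEC =====
-- Pre_ excludes d < 0, where A does float arithmetic (a**d is a float: A usually
-- diverges and any value it returns depends on binary-float exactness), and the
-- inputs with p ≤ 1 or gcd(a^d mod p, p) ≠ 1, where no modular inverse exists and
-- A's while-loop diverges.
def Pre_elgamal_decrypt (p : Int) (d : Int) (a : Int) (b : Int) : Prop :=
  2 ≤ p ∧ 0 ≤ d ∧ (d = 0 ∨ Int.gcd a p = 1)
instance (p : Int) (d : Int) (a : Int) (b : Int) : Decidable (Pre_elgamal_decrypt p d a b) := by unfold Pre_elgamal_decrypt; infer_instance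

def pvWitness_elgamal_decrypt : Int × Int × Int × Int := (7, 3, 2, 5)

def Spec_elgamal_decrypt (p : Int) (d : Int) (a : Int) (b : Int) (out : Int) : Prop := out = elgamal_decrypt_alt p d a b
instance (p : Int) (d : Int) (a : Int) (b : Int) (out : Int) : Decidable (Spec_elgamal_decrypt p d a b out) := by unfold Spec_elgamal_decrypt; infer_instance

-- ===== CLAIM (what is proved, stated in full; the proofs are below) =====
def Claim_equal_elgamal_decrypt : Prop := ∀ (p : Int) (d : Int) (a : Int) (b : Int), Dom_elgamal_decrypt p d a b → Pre_elgamal_decrypt p d a b → Spec_elgamal_decrypt p d a b (elgamal_decrypt p d a b)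

-- ===== LEMMAS AND PROOFS =====

-- Invariant of Source B's loop: if p divides h*s0 - r0 and h*s1 - r1, both rests are
-- nonnegative and gcd r0 r1 = 1, then the returned coefficient s is an inverse of
-- h modulo p.  Strong induction via an explicit bound n on r1.natAbs.
theorem egcdLoop_inv (hh p : Int) :
    ∀ (n : Nat) (r0 r1 s0 s1 : Int), r1.natAbs ≤ n → 0 ≤ r0 → 0 ≤ r1 →
      p ∣ hh * s0 - r0 → p ∣ hh * s1 - r1 → Int.gcd r0 r1 = 1 →
      p ∣ hh * egcdLoop r0 r1 s0 s1 - 1 := by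
  intro n
  induction n with
  | zero =>
      intro r0 r1 s0 s1 hn h0 h1 hs0 hs1 hg
      have hr1 : r1 = 0 := by omega
      subst hr1
      rw [egcdLoop]
      have : r0 = 1 := by
        have := Int.gcd_zero_right r0  -- gcd r0 0 = r0.natAbs
        omega
      simpa [this] using hs0
  | succ n ih =>
      intro r0 r1 s0 s1 hn h0 h1 hs0 hs1 hg
      by_cases hz : r1 = 0
      · subst hz
        rw [egcdLoop]
        have : r0 = 1 := by
          have := Int.gcd_zero_right r0
          omega
        simpa [this] using hs0
      · rw [egcdLoop]
        simp only [dif_neg hz]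
        have hpos : 0 < r1 := by omega
        set q := PySem.Int.floordiv r0 r1 with hq
        have hm := PySem.Int.floordiv_mul_add_mod r0 r1
        have hrm : r0 - q * r1 = PySem.Int.mod r0 r1 := by rw [hq]; omega
        have hmn : 0 ≤ r0 - q * r1 := by
          have := PySem.Int.mod_nonneg r0 hpos; omega
        have hml : r0 - q * r1 < r1 := by
          have := PySem.Int.mod_lt r0 hpos; omega
        apply ih r1 (r0 - q * r1) s1 (s0 - q * s1)
        · rw [hrm]
          have h1 := PySem.Int.mod_nonneg r0 hpos
          have h2 := PySem.Int.mod_lt r0 hpos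
          omega
        · omega
        · exact hmn
        · exact hs1
        · have : hh * (s0 - q * s1) - (r0 - q * r1)
              = (hh * s0 - r0) - q * (hh * s1 - r1) := by ring
          rw [this]
          exact dvd_sub hs0 (Dvd.dvd.mul_left hs1 q)
        · rw [Int.gcd_sub_mul_right_right r1 r0 q, Int.gcd_comm]
          exact hg

-- A's loop reaches the inverse x: starting below x with fuel ≥ x - inverse and no
-- solution strictly between, it returns x.
theorem loopA_eq (p hh x : Int)
    (hx : PySem.Int.mod (hh * x) p = 1)
    (huniq : ∀ j : Int, 0 < j → j < x → PySem.Int.mod (hh * j) p ≠ 1) :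
    ∀ (fuel : Nat) (inv h1 : Int), 0 ≤ inv → inv < x → x ≤ inv + fuel → h1 ≠ 1 →
      elgamalLoopA p hh fuel inv h1 = x := by
  intro fuel
  induction fuel with
  | zero => intro inv h1 _ h2 h3 _; omega
  | succ fuel ih =>
      intro inv h1 h0 hlt hb hne
      rw [elgamalLoopA]
      simp only [if_pos hne]
      by_cases hstep : inv + 1 = x
      · rw [hstep, hx]
        cases fuel with
        | zero => rfl
        | succ fuel => rw [elgamalLoopA]; simp
      · have hlt' : inv + 1 < x := by omega
        exact ih (inv + 1) _ (by omega) hlt' (by omega)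
          (huniq (inv + 1) (by omega) hlt')

-- mod by a positive p is Int.emod (for rewriting between the two).
theorem main_equiv (p d a b : Int) (hp : 2 ≤ p)
    (hg : Int.gcd (a ^ d.toNat) p = 1) :
    elgamal_decrypt p d a b = elgamal_decrypt_alt p d a b := by
  have hppos : (0:Int) < p := by omega
  set hh := PySem.Int.mod (a ^ d.toNat) p with hhh
  have hhe : hh = (a ^ d.toNat) % p := PySem.Int.mod_eq_emod_of_pos hppos
  -- gcd hh p = 1
  have hghh : Int.gcd hh p = 1 := by
    rw [hhe, Int.gcd_comm, Int.emod_def, Int.gcd_sub_mul_left_right p _ _,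
        Int.gcd_comm]
    exact hg
  -- B's inverse
  set s := egcdLoop hh p 1 0 with hs
  have hdvd : p ∣ hh * s - 1 := by
    apply egcdLoop_inv hh p p.natAbs hh p 1 0 le_rfl
    · rw [hhe]; exact Int.emod_nonneg _ (by omega)
    · omega
    · simp
    · simp
    · exact hghh
  set x := PySem.Int.mod s p with hx
  have hxe : x = s % p := PySem.Int.mod_eq_emod_of_pos hppos
  have hx0 : 0 ≤ x := PySem.Int.mod_nonneg s hppos
  have hxlt : x < p := PySem.Int.mod_lt s hppos
  have hdx : p ∣ hh * x - 1 := by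
    have h1 : p ∣ x - s := by
      rw [hxe, Int.emod_def]; exact ⟨-(s / p), by ring⟩
    have : hh * x - 1 = (hh * s - 1) + hh * (x - s) := by ring
    rw [this]
    exact dvd_add hdvd (Dvd.dvd.mul_left h1 hh)
  have hmodx : PySem.Int.mod (hh * x) p = 1 := by
    rw [PySem.Int.mod_eq_emod_of_pos hppos]
    obtain ⟨k, hk⟩ := hdx
    have : hh * x = 1 + p * k := by omega
    rw [this, Int.add_mul_emod_self_left]
    exact Int.emod_eq_of_lt (by omega) (by omega)
  have hx1 : 1 ≤ x := by
    rcases eq_or_lt_of_le hx0 with h | h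
    · exfalso
      have : PySem.Int.mod (hh * x) p = 0 := by
        rw [← h]; simp [PySem.Int.mod_eq_emod_of_pos hppos]
      omega
    · omega
  -- the coprimality transfer for uniqueness
  have hcop : IsCoprime p hh := by
    rw [Int.isCoprime_iff_gcd_eq_one, Int.gcd_comm]; exact hghh
  have huniq : ∀ j : Int, 0 < j → j < x → PySem.Int.mod (hh * j) p ≠ 1 := by
    intro j hj0 hjx hcontra
    have hdj : p ∣ hh * j - 1 := by
      rw [PySem.Int.mod_eq_emod_of_pos hppos] at hcontra
      have := Int.emod_def (hh * j) p
      exact ⟨(hh * j) / p, by omega⟩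
    have hdiff : p ∣ hh * (x - j) := by
      have : hh * (x - j) = (hh * x - 1) - (hh * j - 1) := by ring
      rw [this]; exact dvd_sub hdx hdj
    have hpd : p ∣ x - j := hcop.dvd_of_dvd_mul_left hdiff
    have := Int.le_of_dvd (by omega) hpd
    omega
  -- both results
  show PySem.Int.mod (b * elgamalLoopA p hh (p.toNat + 1) 0 2) p
      = PySem.Int.mod (b * PySem.Int.mod (egcdLoop (PySem.Int.powMod a d.toNat p) p 1 0) p) p
  rw [PySem.Int.powMod_eq, ← hhh, ← hs, ← hx]
  rw [loopA_eq p hh x hmodx huniq (p.toNat + 1) 0 2 le_rfl (by omega) (by omega)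
      (by decide)]

-- ===== VERDICT (by name: the statement is the Claim_ definition above) =====
theorem elgamal_decrypt_spec : Claim_equal_elgamal_decrypt := by
  intro p d a b _ hpre
  obtain ⟨hp, _hd, hg⟩ := hpre
  apply main_equiv p d a b hp
  rcases hg with h0 | hco
  · simp [h0]
  · have : IsCoprime (a : Int) p := Int.isCoprime_iff_gcd_eq_one.mpr hco
    exact Int.isCoprime_iff_gcd_eq_one.mp (this.pow_left)
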